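-- pv_equiv track=rewrite | github.com/jahidhasanlinix/cryptography | rijndaelsBox.py | multiply_ints_as_polynomials
-- ===== SOURCE A (Python) =====
-- def multiply_ints_as_polynomials(x: int, y: int) -> int:
--     z = 0
--     while x:
--         if x & 1:
--             z ^= y
--         y <<= 1
--         x >>= 1
--     return z
-- ===== SOURCE B (Python) =====
-- def multiply_ints_as_polynomials(x: int, y: int) -> int:
--     # term-by-term GF(2) product: for each set bit i of x and set bit j of y,
--     # toggle the monomial bit i+j of the result
--     z = 0
--     for i in range(x.bit_length()):
--         if (x >> i) & 1:
--             t = y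
--             j = 0
--             while t:
--                 if t & 1:
--                     z ^= 1 << (i + j)
--                 t >>= 1
--                 j += 1
--     return z
-- ===== Notes on version B (the rewrite author's own statement) =====
-- stated objective: alternative
-- what changed: B multiplies the two GF(2) polynomials term by term: it scans bit indices i of x up to x.bit_length() and, for each set bit, the set bits j of y, toggling one monomial bit 1<<(i+j) per pair, instead of A's single shift-and-xor loop that xors the whole shifted accumulator y into z.
-- outside the precondition, e.g. on multiply_ints_as_polynomials(1, -1): A returns -1, B does not finish within the time limit
import Mathlib
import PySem

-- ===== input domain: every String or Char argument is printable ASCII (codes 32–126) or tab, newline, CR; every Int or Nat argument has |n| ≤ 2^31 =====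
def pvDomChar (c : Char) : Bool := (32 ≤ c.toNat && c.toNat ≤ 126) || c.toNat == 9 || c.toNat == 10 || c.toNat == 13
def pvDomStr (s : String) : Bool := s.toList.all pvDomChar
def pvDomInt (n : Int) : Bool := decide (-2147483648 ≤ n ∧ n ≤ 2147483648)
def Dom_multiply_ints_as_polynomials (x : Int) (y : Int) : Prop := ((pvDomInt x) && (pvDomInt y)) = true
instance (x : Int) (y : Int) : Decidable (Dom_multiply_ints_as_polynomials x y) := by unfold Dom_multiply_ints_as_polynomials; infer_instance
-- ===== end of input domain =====

-- B computes the carry-less product term by term (double loop over set bits, toggling one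
-- monomial bit per pair) instead of A's shift-and-xor accumulator loop; equal on Pre_.

-- ===== PORT A =====
-- while x: if x & 1: z ^= y; y <<= 1; x >>= 1
-- the loop variable x is nonnegative on Pre_, so it is carried as a Nat (x >> 1 = x / 2)
def pvGoA (x : Nat) (y z : Int) : Int :=
  if x = 0 then z
  else pvGoA (x / 2) (y <<< (1 : Nat)) (if x % 2 = 1 then PySem.Int.bxor z y else z)

def multiply_ints_as_polynomials (x : Int) (y : Int) : Int :=
  pvGoA x.toNat y 0

-- ===== PORT B =====
-- x.bit_length()
def pvBitLength (n : Nat) : Nat :=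
  if n = 0 then 0 else pvBitLength (n / 2) + 1

-- inner loop: while t: if t & 1: z ^= 1 << (i + j); t >>= 1; j += 1
-- (t starts at y, nonnegative on Pre_ when the loop is reached, so carried as a Nat)
def pvGoBInner (t : Nat) (i j : Nat) (z : Int) : Int :=
  if t = 0 then z
  else pvGoBInner (t / 2) i (j + 1)
    (if t % 2 = 1 then PySem.Int.bxor z ((1 : Int) <<< (i + j)) else z)

-- outer loop: for i in range(x.bit_length()): if (x >> i) & 1: <inner loop over y>
def pvGoBOuter (x : Nat) (y : Int) (L i : Nat) (z : Int) : Int :=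
  if i < L then
    pvGoBOuter x y L (i + 1) (if (x >>> i) % 2 = 1 then pvGoBInner y.toNat i 0 z else z)
  else z
termination_by L - i

def multiply_ints_as_polynomials_alt (x : Int) (y : Int) : Int :=
  pvGoBOuter x.toNat y (pvBitLength x.toNat) 0 0

-- ===== PRECONDITION & SPEC =====
-- Pre_ excludes negative x, on which A loops forever, and negative y with x ≠ 0, where A
-- returns a signed-XOR accumulation but B's enumeration of the set bits of y never terminates.
def Pre_multiply_ints_as_polynomials (x : Int) (y : Int) : Prop :=
  0 ≤ x ∧ (0 ≤ y ∨ x = 0)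
instance (x : Int) (y : Int) : Decidable (Pre_multiply_ints_as_polynomials x y) := by
  unfold Pre_multiply_ints_as_polynomials; infer_instance

def pvWitness_multiply_ints_as_polynomials : Int × Int := (3, 5)

def Spec_multiply_ints_as_polynomials (x : Int) (y : Int) (out : Int) : Prop :=
  out = multiply_ints_as_polynomials_alt x y
instance (x : Int) (y : Int) (out : Int) : Decidable (Spec_multiply_ints_as_polynomials x y out) := by
  unfold Spec_multiply_ints_as_polynomials; infer_instance

-- ===== CLAIM (what is proved, stated in full; the proofs are below) =====
def Claim_equal_multiply_ints_as_polynomials : Prop :=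
  ∀ (x : Int) (y : Int), Dom_multiply_ints_as_polynomials x y →
    Pre_multiply_ints_as_polynomials x y →
    Spec_multiply_ints_as_polynomials x y (multiply_ints_as_polynomials x y)

-- ===== LEMMAS AND PROOFS =====

-- splitting a polynomial into its low bit and the rest: (t%2)<<k ^ (t/2)<<(k+1) = t<<k
theorem pvShiftSplit (t k : Nat) :
    ((t % 2) <<< k) ^^^ ((t / 2) <<< (k + 1)) = t <<< k := by
  apply Nat.eq_of_testBit_eq
  intro n
  simp only [Nat.testBit_xor, Nat.testBit_shiftLeft]
  rcases Nat.lt_or_ge n k with h | h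
  · simp [Nat.not_le_of_lt h, show ¬ (k + 1 ≤ n) by omega]
  · rcases Nat.eq_or_lt_of_le h with he | hl
    · subst he
      simp only [Nat.le_refl, decide_true, Bool.true_and, Nat.sub_self,
        show ¬ (k + 1 ≤ k) by omega, decide_false, Bool.false_and, Bool.xor_false]
      simp only [Nat.testBit_zero]
      have h22 : t % 2 % 2 = t % 2 := by omega
      rw [h22]
    · have h1 : k ≤ n := by omega
      have h2 : k + 1 ≤ n := by omega
      simp only [h1, h2, decide_true, Bool.true_and]
      have hs : n - k = (n - (k + 1)) + 1 := by omega
      rw [hs]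
      have hlow : (t % 2).testBit ((n - (k + 1)) + 1) = false := by
        apply Nat.testBit_eq_false_of_lt
        have h2' : t % 2 < 2 := Nat.mod_lt _ (by norm_num)
        calc t % 2 < 2 := h2'
          _ = 2 ^ 1 := rfl
          _ ≤ 2 ^ (n - (k + 1) + 1) := Nat.pow_le_pow_right (by norm_num) (by omega)
      rw [hlow]
      simp [Nat.testBit_succ]

-- casting the single-bit literal 1 << m from Nat to Int
theorem pvOneShift (m : Nat) : (1 : Int) <<< m = ((1 <<< m : Nat) : Int) := by
  rw [show (1 : Int) = ((1 : Nat) : Int) from rfl, Int.natCast_shiftLeft]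

-- the inner loop xors the polynomial t, shifted by i+j, into z
theorem pvGoBInner_eq (t : Nat) : ∀ (i j : Nat) (z : Nat),
    pvGoBInner t i j (↑z) = ↑(z ^^^ (t <<< (i + j))) := by
  induction t using Nat.strong_induction_on with
  | _ t ih =>
    intro i j z
    unfold pvGoBInner
    by_cases h0 : t = 0
    · simp [h0]
    · have ht2 : t / 2 < t := Nat.div_lt_self (Nat.pos_of_ne_zero h0) (by norm_num)
      rw [if_neg h0]
      have key : (if t % 2 = 1 then PySem.Int.bxor (↑z) ((1 : Int) <<< (i + j)) else (↑z : Int))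
          = ↑(z ^^^ ((t % 2) <<< (i + j))) := by
        by_cases hb1 : t % 2 = 1
        · rw [if_pos hb1, hb1, pvOneShift, PySem.Int.bxor_natCast]
        · have hz : t % 2 = 0 := by omega
          rw [if_neg hb1, hz]
          simp
      rw [key, ih (t / 2) ht2]
      have hk : i + (j + 1) = (i + j) + 1 := by omega
      rw [hk, Nat.xor_assoc, pvShiftSplit]

-- the bit length bounds its argument
theorem pvBitLength_lt (n : Nat) : n < 2 ^ pvBitLength n := by
  induction n using Nat.strong_induction_on with
  | _ n ih =>
    unfold pvBitLength
    by_cases h : n = 0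
    · simp [h]
    · rw [if_neg h]
      have := ih (n / 2) (Nat.div_lt_self (Nat.pos_of_ne_zero h) (by norm_num))
      rw [Nat.pow_succ]
      omega

-- once all remaining bits of x are zero, the outer loop leaves z unchanged
theorem pvGoBOuter_zero (x : Nat) (y : Int) (L : Nat) : ∀ (d i : Nat), L - i ≤ d →
    x >>> i = 0 → ∀ z, pvGoBOuter x y L i z = z := by
  intro d
  induction d with
  | zero =>
    intro i hd h0 z
    unfold pvGoBOuter
    rw [if_neg (by omega)]
  | succ d ihd =>
    intro i hd h0 z
    unfold pvGoBOuter
    by_cases hiL : i < L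
    · rw [if_pos hiL, h0]
      have hnext : x >>> (i + 1) = 0 := by
        rw [Nat.shiftRight_succ, h0]
      rw [if_neg (by norm_num)]
      exact ihd (i + 1) (by omega) hnext z
    · rw [if_neg hiL]

-- the two programs agree: A's shifted-accumulator state y <<< i matches B's bit index i
theorem pvGo_eq (X y L : Nat) (hX : X < 2 ^ L) : ∀ (d i : Nat), L - i ≤ d → ∀ (z : Nat),
    pvGoBOuter X (↑y) L i (↑z) = pvGoA (X >>> i) (↑(y <<< i)) (↑z) := by
  intro d
  induction d with
  | zero =>
    intro i hd z
    have h0 : X >>> i = 0 := by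
      rw [Nat.shiftRight_eq_div_pow]
      exact Nat.div_eq_of_lt (lt_of_lt_of_le hX (Nat.pow_le_pow_right (by norm_num) (by omega)))
    unfold pvGoBOuter pvGoA
    rw [if_neg (by omega), h0, if_pos rfl]
  | succ d ihd =>
    intro i hd z
    by_cases hiL : i < L
    · unfold pvGoBOuter
      rw [if_pos hiL]
      by_cases hx0 : X >>> i = 0
      · have hnext : X >>> (i + 1) = 0 := by rw [Nat.shiftRight_succ, hx0]
        rw [hx0, if_neg (by norm_num)]
        rw [pvGoBOuter_zero X (↑y) L d (i + 1) (by omega) hnext]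
        unfold pvGoA
        rw [if_pos rfl]
      · conv_rhs => unfold pvGoA
        rw [if_neg hx0]
        have hdiv : X >>> i / 2 = X >>> (i + 1) := (Nat.shiftRight_succ X i).symm
        have hsh : (↑(y <<< i) : Int) <<< (1 : Nat) = ↑(y <<< (i + 1)) := by
          simp [Int.natCast_shiftLeft, Nat.shiftLeft_add]
        have htn : (↑y : Int).toNat = y := Int.toNat_natCast y
        rw [hdiv, hsh, htn]
        by_cases hb : X >>> i % 2 = 1
        · rw [if_pos hb, if_pos hb, pvGoBInner_eq y i 0 z,
            show PySem.Int.bxor (↑z) (↑(y <<< i)) = ↑(z ^^^ (y <<< (i + 0))) by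
              rw [Nat.add_zero, PySem.Int.bxor_natCast]]
          exact ihd (i + 1) (by omega) _
        · rw [if_neg hb, if_neg hb]
          exact ihd (i + 1) (by omega) z
    · have h0 : X >>> i = 0 := by
        rw [Nat.shiftRight_eq_div_pow]
        exact Nat.div_eq_of_lt (lt_of_lt_of_le hX (Nat.pow_le_pow_right (by norm_num) (by omega)))
      unfold pvGoBOuter pvGoA
      rw [if_neg hiL, h0, if_pos rfl]

-- ===== VERDICT (by name: the statement is the Claim_ definition above) =====
theorem multiply_ints_as_polynomials_spec : Claim_equal_multiply_ints_as_polynomials := by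
  intro x y _ hpre
  obtain ⟨hx, hy⟩ := hpre
  unfold Spec_multiply_ints_as_polynomials multiply_ints_as_polynomials multiply_ints_as_polynomials_alt
  rcases hy with hy | hx0
  · have hyc : (↑y.toNat : Int) = y := Int.toNat_of_nonneg hy
    have := pvGo_eq x.toNat y.toNat (pvBitLength x.toNat) (pvBitLength_lt x.toNat)
      (pvBitLength x.toNat) 0 (by omega) 0
    simpa [hyc, Nat.shiftRight_zero, Nat.shiftLeft_zero] using this.symm
  · subst hx0
    simp [pvGoA, pvGoBOuter, pvBitLength]
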